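-- pv_equiv track=rewrite | github.com/AmyG-LSU/Final-4444 | src/data_loading.py | choose_five_year_window
-- ===== SOURCE A (Python) =====
-- from typing import List, Tuple
--
-- def choose_five_year_window(common_years: List[int]) -> Tuple[int, int]:
--     """
--     Given a list of common years, pick the most recent contiguous 5-year span.
--
--     If no perfectly contiguous span is found, default to the last 5 years.
--     """
--     if len(common_years) < 5:
--         raise ValueError(f"Not enough common years for a 5-year window: {common_years}")
--
--     years = sorted(common_years)
--
--     # walk from the end backwards looking for a block of 5 consecutive years
--     for i in range(len(years) - 4, -1, -1):
--         window = years[i : i + 5]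
--         if window == list(range(window[0], window[0] + 5)):
--             return window[0], window[-1]
--
--     # fallback: last 5 years (even if not perfectly contiguous)
--     return years[-5], years[-1]
-- ===== SOURCE B (Python) =====
-- from typing import List, Tuple
--
-- def choose_five_year_window(common_years: List[int]) -> Tuple[int, int]:
--     if len(common_years) < 5:
--         raise ValueError(f"Not enough common years for a 5-year window: {common_years}")
--
--     years = sorted(common_years)
--
--     # single forward pass: count the consecutive run ending at j; the last
--     # position where the run reaches 5 gives the most recent window
--     best = None
--     run = 1
--     for j in range(1, len(years)):
--         run = run + 1 if years[j] - years[j - 1] == 1 else 1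
--         if run >= 5:
--             best = (years[j - 4], years[j])
--
--     return best if best is not None else (years[-5], years[-1])
-- ===== Notes on version B (the rewrite author's own statement) =====
-- stated objective: simpler
-- what changed: Replaced the backward scan that slices a 5-element window at every start and compares it with list(range(...)) by a single forward pass keeping a consecutive-run counter, remembering the last position where the run reaches 5.
import Mathlib
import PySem

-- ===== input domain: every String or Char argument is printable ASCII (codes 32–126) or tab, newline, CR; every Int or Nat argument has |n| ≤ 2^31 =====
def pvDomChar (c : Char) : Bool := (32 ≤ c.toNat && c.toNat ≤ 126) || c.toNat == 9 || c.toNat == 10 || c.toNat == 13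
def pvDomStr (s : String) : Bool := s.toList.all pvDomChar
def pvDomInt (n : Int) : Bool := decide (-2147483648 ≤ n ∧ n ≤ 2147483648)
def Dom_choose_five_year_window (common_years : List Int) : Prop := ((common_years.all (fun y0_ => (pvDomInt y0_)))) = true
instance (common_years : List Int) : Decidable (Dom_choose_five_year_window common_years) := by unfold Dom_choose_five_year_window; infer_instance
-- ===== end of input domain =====

-- B replaces A's backward slice-and-compare window scan by a single forward
-- consecutive-run counter (last run of length ≥ 5 wins); objective: simpler.

-- ===== PORT A =====
-- the backward for-loop with early return, as structural recursion over the index list;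
-- window[0]/window[-1] are read with pyGetD (exact here: the window is nonempty for every
-- index the loop visits when len ≥ 5, which Pre_ guarantees)
def pvALoop (years : List Int) : List Int → Option (Int × Int)
  | [] => none
  | i :: rest =>
    let window := PySem.List.slice years (some i) (some (i + 5))
    let w0 := PySem.List.pyGetD window 0 0
    if window = PySem.List.pyRange w0 (w0 + 5) 1 then
      some (w0, PySem.List.pyGetD window (-1) 0)
    else pvALoop years rest

def choose_five_year_window (common_years : List Int) : Int × Int :=
  let years := PySem.List.sorted common_years (fun y => y) false
  match pvALoop years (PySem.List.pyRange ((years.length : Int) - 4) (-1) (-1)) with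
  | some r => r
  | none => (PySem.List.pyGetD years (-5) 0, PySem.List.pyGetD years (-1) 0)

-- ===== PORT B =====
-- one fold over range(1, len(years)) carrying (run, best)
def pvBStep (years : List Int) (st : Int × Option (Int × Int)) (j : Int) : Int × Option (Int × Int) :=
  let run := if PySem.List.pyGetD years j 0 - PySem.List.pyGetD years (j - 1) 0 = 1 then st.1 + 1 else 1
  (run, if 5 ≤ run then some (PySem.List.pyGetD years (j - 4) 0, PySem.List.pyGetD years j 0) else st.2)

def choose_five_year_window_alt (common_years : List Int) : Int × Int :=
  let years := PySem.List.sorted common_years (fun y => y) false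
  let st := (PySem.List.pyRange 1 (years.length : Int) 1).foldl (pvBStep years) (1, none)
  match st.2 with
  | some r => r
  | none => (PySem.List.pyGetD years (-5) 0, PySem.List.pyGetD years (-1) 0)

-- ===== PRECONDITION & SPEC =====
-- Python A raises ValueError exactly when len(common_years) < 5
def Pre_choose_five_year_window (common_years : List Int) : Prop := 5 ≤ common_years.length
instance (common_years : List Int) : Decidable (Pre_choose_five_year_window common_years) := by unfold Pre_choose_five_year_window; infer_instance
def pvWitness_choose_five_year_window : List Int := [2001, 2000, 2004, 2002, 2003]

def Spec_choose_five_year_window (common_years : List Int) (out : Int × Int) : Prop := out = choose_five_year_window_alt common_years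
instance (common_years : List Int) (out : Int × Int) : Decidable (Spec_choose_five_year_window common_years out) := by unfold Spec_choose_five_year_window; infer_instance

-- ===== CLAIM (what is proved, stated in full; the proofs are below) =====
def Claim_equal_choose_five_year_window : Prop := ∀ (common_years : List Int), Dom_choose_five_year_window common_years → Pre_choose_five_year_window common_years → Spec_choose_five_year_window common_years (choose_five_year_window common_years)

-- ===== LEMMAS AND PROOFS =====

-- run counter as a pure recursion over the position (proof-only helper)
def pvRun (ys : List Int) : Nat → Int
  | 0 => 1
  | k + 1 => if ys.getD (k + 1) 0 - ys.getD k 0 = 1 then pvRun ys k + 1 else 1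

-- best-so-far after position k (proof-only helper)
def pvBest (ys : List Int) : Nat → Option (Int × Int)
  | 0 => none
  | k + 1 => if 5 ≤ pvRun ys (k + 1) then some (ys.getD (k + 1 - 4) 0, ys.getD (k + 1) 0) else pvBest ys k

lemma pvRun_ge_one (ys : List Int) (k : Nat) : 1 ≤ pvRun ys k := by
  cases k with
  | zero => simp [pvRun]
  | succ k => unfold pvRun; split <;> [skip; omega]; have := pvRun_ge_one ys k; omega

lemma pvRun_le (ys : List Int) (k : Nat) : pvRun ys k ≤ (k : Int) + 1 := by
  induction k with
  | zero => simp [pvRun]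
  | succ k ih => unfold pvRun; split <;> push_cast <;> omega

lemma pvRun_succ_ge (ys : List Int) (k : Nat) (m : Int) (hm : 1 ≤ m) :
    (m + 1 ≤ pvRun ys k) ↔ (1 ≤ k ∧ ys.getD k 0 - ys.getD (k - 1) 0 = 1 ∧ m ≤ pvRun ys (k - 1)) := by
  cases k with
  | zero => simp [pvRun]; omega
  | succ k =>
    by_cases h : ys.getD (k + 1) 0 - ys.getD k 0 = 1
    · have h1 := pvRun_ge_one ys k
      simp [pvRun]
      omega
    · simp [pvRun, h]
      omega

lemma pvRun_four_iff (ys : List Int) (i : Nat) :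
    (5 ≤ pvRun ys (i + 4)) ↔
      (ys.getD (i + 1) 0 - ys.getD i 0 = 1 ∧ ys.getD (i + 2) 0 - ys.getD (i + 1) 0 = 1 ∧
       ys.getD (i + 3) 0 - ys.getD (i + 2) 0 = 1 ∧ ys.getD (i + 4) 0 - ys.getD (i + 3) 0 = 1) := by
  rw [show (5:Int) = 4 + 1 by norm_num, pvRun_succ_ge ys (i + 4) 4 (by norm_num)]
  rw [show i + 4 - 1 = i + 3 from rfl, show (4:Int) = 3 + 1 by norm_num,
      pvRun_succ_ge ys (i + 3) 3 (by norm_num)]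
  rw [show i + 3 - 1 = i + 2 from rfl, show (3:Int) = 2 + 1 by norm_num,
      pvRun_succ_ge ys (i + 2) 2 (by norm_num)]
  rw [show i + 2 - 1 = i + 1 from rfl, show (2:Int) = 1 + 1 by norm_num,
      pvRun_succ_ge ys (i + 1) 1 (by norm_num)]
  rw [show i + 1 - 1 = i from rfl]
  have h1 := pvRun_ge_one ys i
  constructor
  · rintro ⟨-, a4, -, a3, -, a2, -, a1, -⟩; exact ⟨a1, a2, a3, a4⟩
  · rintro ⟨a1, a2, a3, a4⟩; exact ⟨by omega, a4, by omega, a3, by omega, a2, by omega, a1, h1⟩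

lemma pvFold_eq (ys : List Int) (k : Nat) :
    (PySem.List.pyRange 1 ((k : Int) + 1) 1).foldl (pvBStep ys) (1, none) = (pvRun ys k, pvBest ys k) := by
  induction k with
  | zero =>
    rw [show ((0:Nat):Int) + 1 = 1 by norm_num, PySem.List.pyRange_one_eq_nil (by norm_num)]
    simp [pvRun, pvBest]
  | succ k ih =>
    rw [show (((k+1:Nat)):Int) + 1 = ((k:Int) + 1) + 1 by push_cast; ring,
        PySem.List.pyRange_one_succ_right (by omega), List.foldl_append, ih]
    have g1 : PySem.List.pyGetD ys ((k:Int) + 1) 0 = ys.getD (k + 1) 0 := by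
      rw [show ((k:Int) + 1) = (((k+1:Nat)):Int) by push_cast; ring, PySem.List.pyGetD_natCast]
    have g2 : PySem.List.pyGetD ys ((k:Int) + 1 - 1) 0 = ys.getD k 0 := by
      rw [show ((k:Int) + 1 - 1) = ((k:Nat):Int) by ring, PySem.List.pyGetD_natCast]
    simp only [List.foldl_cons, List.foldl_nil, pvBStep, g1, g2]
    have hrun : (if ys.getD (k+1) 0 - ys.getD k 0 = 1 then pvRun ys k + 1 else 1) = pvRun ys (k+1) := by
      simp [pvRun]
    rw [hrun]
    by_cases hr : (5:Int) ≤ pvRun ys (k + 1)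
    · have hk3 : 3 ≤ k := by have := pvRun_le ys (k + 1); omega
      have g3 : PySem.List.pyGetD ys ((k:Int) + 1 - 4) 0 = ys.getD (k + 1 - 4) 0 := by
        rw [show ((k:Int) + 1 - 4) = (((k-3:Nat)):Int) by omega, PySem.List.pyGetD_natCast,
            show k + 1 - 4 = k - 3 by omega]
      simp [pvBest, hr, g3]
    · simp [pvBest, hr]

lemma pvRange5 (x : Int) : PySem.List.pyRange x (x + 5) 1 = [x, x + 1, x + 2, x + 3, x + 4] := by
  rw [PySem.List.pyRange_one_cons (by omega), PySem.List.pyRange_one_cons (by omega),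
      PySem.List.pyRange_one_cons (by omega), PySem.List.pyRange_one_cons (by omega),
      PySem.List.pyRange_one_cons (by omega), PySem.List.pyRange_one_eq_nil (by omega)]
  norm_num
  omega

-- one iteration of A's loop at an in-range start index i, rephrased through pvRun
lemma pvCons (ys : List Int) (i : Nat) (h : i + 5 ≤ ys.length) (rest : List Int) :
    pvALoop ys ((i : Int) :: rest) =
      (if 5 ≤ pvRun ys (i + 4) then some (ys.getD i 0, ys.getD (i + 4) 0) else pvALoop ys rest) := by
  have hw : PySem.List.slice ys (some (i : Int)) (some ((i : Int) + 5)) = (ys.drop i).take 5 := by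
    rw [show ((i : Int) + 5) = ((i : Int) + ((5:Nat) : Int)) by norm_num,
        PySem.List.slice_natCast_add]
  have hlen : ((ys.drop i).take 5).length = 5 := by simp; omega
  have hget : ∀ t : Nat, t < 5 → ((ys.drop i).take 5).getD t 0 = ys.getD (i + t) 0 := by
    intro t ht
    rw [List.getD_eq_getElem _ _ (by omega), List.getD_eq_getElem _ _ (by omega)]
    simp [Nat.add_comm i t]
  have hw0 : PySem.List.pyGetD ((ys.drop i).take 5) 0 0 = ys.getD i 0 := by
    rw [PySem.List.pyGetD_zero, hget 0 (by omega)]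
    norm_num
  have hcond : ((ys.drop i).take 5 =
      PySem.List.pyRange (ys.getD i 0) (ys.getD i 0 + 5) 1) ↔ (5 ≤ pvRun ys (i + 4)) := by
    rw [pvRange5, pvRun_four_iff]
    have e0 := hget 0 (by omega); have e1 := hget 1 (by omega); have e2 := hget 2 (by omega)
    have e3 := hget 3 (by omega); have e4 := hget 4 (by omega)
    constructor
    · intro heq
      rw [heq] at e0 e1 e2 e3 e4
      simp only [List.getD_cons_zero, List.getD_cons_succ] at e0 e1 e2 e3 e4
      omega
    · rintro ⟨a1, a2, a3, a4⟩
      apply List.ext_getElem (by simp [hlen])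
      intro t ht1 ht2
      have hgd : ((ys.drop i).take 5)[t] = ((ys.drop i).take 5).getD t 0 := by
        rw [List.getD_eq_getElem _ _ ht1]
      rw [hlen] at ht1
      interval_cases t
      · rw [hgd, hget 0 (by omega)]; norm_num
      · rw [hgd, hget 1 (by omega)]; simp only [List.getElem_cons_succ, List.getElem_cons_zero]; omega
      · rw [hgd, hget 2 (by omega)]; simp only [List.getElem_cons_succ, List.getElem_cons_zero]; omega
      · rw [hgd, hget 3 (by omega)]; simp only [List.getElem_cons_succ, List.getElem_cons_zero]; omega
      · rw [hgd, hget 4 (by omega)]; simp only [List.getElem_cons_succ, List.getElem_cons_zero]; omega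
  have hlast : PySem.List.pyGetD ((ys.drop i).take 5) (-1) 0 = ys.getD (i + 4) 0 := by
    rw [PySem.List.pyGetD_neg_one _ _ (by intro hnil; rw [hnil] at hlen; simp at hlen)]
    rw [List.getLast_eq_getElem, ← List.getD_eq_getElem _ 0 (by omega)]
    rw [hlen]
    exact hget 4 (by omega)
  show (if _ = _ then _ else _) = _
  rw [hw, hw0]
  by_cases hc : (ys.drop i).take 5 = PySem.List.pyRange (ys.getD i 0) (ys.getD i 0 + 5) 1
  · rw [if_pos hc, if_pos (hcond.mp hc), hlast]
  · rw [if_neg hc, if_neg (fun h5 => hc (hcond.mpr h5))]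

-- A's check at start index len-4 (4-element window) always fails
lemma pvShort (ys : List Int) (i : Nat) (h1 : i < ys.length) (h2 : ys.length < i + 5)
    (rest : List Int) : pvALoop ys ((i : Int) :: rest) = pvALoop ys rest := by
  have hw : PySem.List.slice ys (some (i : Int)) (some ((i : Int) + 5)) = (ys.drop i).take 5 := by
    rw [show ((i : Int) + 5) = ((i : Int) + ((5:Nat) : Int)) by norm_num,
        PySem.List.slice_natCast_add]
  show (if _ = _ then _ else _) = _
  rw [hw, if_neg]
  intro heq
  have := congrArg List.length heq
  simp [PySem.List.length_pyRange_one] at this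
  omega

lemma pvBridge (ys : List Int) (i : Nat) (h : i + 5 ≤ ys.length) :
    pvALoop ys (PySem.List.pyRange (i : Int) (-1) (-1)) = pvBest ys (i + 4) := by
  induction i with
  | zero =>
    rw [PySem.List.pyRange_neg_one_cons (by norm_num), Nat.cast_zero,
        show (0:Int) - 1 = -1 by norm_num, PySem.List.pyRange_neg_one_eq_nil (by norm_num)]
    have hc := pvCons ys 0 h []
    rw [Nat.cast_zero] at hc
    rw [hc, show (0:Nat) + 4 = 3 + 1 from rfl]
    have n3 : ¬ (5:Int) ≤ pvRun ys (2+1) := by have := pvRun_le ys (2+1); omega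
    have n2 : ¬ (5:Int) ≤ pvRun ys (1+1) := by have := pvRun_le ys (1+1); omega
    have n1 : ¬ (5:Int) ≤ pvRun ys (0+1) := by have := pvRun_le ys (0+1); omega
    simp [pvBest, pvALoop, n1, n2, n3]
  | succ i ih =>
    rw [PySem.List.pyRange_neg_one_cons (by omega),
        show (((i+1:Nat)):Int) - 1 = ((i:Nat):Int) by push_cast; ring,
        pvCons ys (i+1) (by omega), ih (by omega),
        show i + 1 + 4 = (i + 4) + 1 by omega]
    simp only [pvBest, show (i + 4) + 1 - 4 = i + 1 from by omega]

-- ===== VERDICT (by name: the statement is the Claim_ definition above) =====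
theorem choose_five_year_window_spec : Claim_equal_choose_five_year_window := by
  intro cy _ hpre
  unfold Pre_choose_five_year_window at hpre
  unfold Spec_choose_five_year_window
  simp only [choose_five_year_window, choose_five_year_window_alt]
  set ys := PySem.List.sorted cy (fun y => y) false with hys
  have hlen : 5 ≤ ys.length := by rw [hys, PySem.List.length_sorted]; exact hpre
  rw [show ((ys.length:Int) - 4) = (((ys.length - 4:Nat)):Int) by omega,
      PySem.List.pyRange_neg_one_cons (by omega),
      show (((ys.length - 4:Nat)):Int) - 1 = (((ys.length - 5:Nat)):Int) by omega,
      pvShort ys (ys.length - 4) (by omega) (by omega),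
      pvBridge ys (ys.length - 5) (by omega),
      show ((ys.length:Int)) = (((ys.length - 1:Nat)):Int) + 1 by omega,
      pvFold_eq,
      show ys.length - 5 + 4 = ys.length - 1 by omega]
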